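-- pv_equiv track=rewrite | github.com/adamkurth/strip_my_pdf | reader.py | select_best_address
-- ===== SOURCE A (Python) =====
-- def select_best_address(addresses, business_name):
--     # Filter out None values and trim spaces
--     valid_addresses = [address.strip() for address in addresses if address]
--
--     # Exclude any address that matches the business name
--     valid_addresses = [address for address in valid_addresses if business_name.lower() not in address.lower()]
--
--     # If there's only one valid address or none, return it
--     if len(valid_addresses) == 1:
--         return valid_addresses[0]
--     elif not valid_addresses:
--         return None
--
--     # Among multiple valid addresses, choose the one with the shortest length
--     shortest_address = min(valid_addresses, key=len)
--
--     # If there is no entry in any of the address_cases, assign the shortest address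
--     if all(address is None for address in addresses):
--         return shortest_address
--
--     return shortest_address
-- ===== SOURCE B (Python) =====
-- def select_best_address(addresses, business_name):
--     # Different algorithm: stably sort all acceptable stripped addresses by
--     # length and take the first; stability makes the first shortest win,
--     # which is exactly min(..., key=len)'s tie-breaking.
--     needle = business_name.lower()
--     candidates = sorted(
--         (a.strip() for a in addresses
--          if a and needle not in a.strip().lower()),
--         key=len,
--     )
--     return candidates[0] if candidates else None
-- ===== Notes on version B (the rewrite author's own statement) =====
-- stated objective: alternative
-- what changed: Replaces the two filtering passes, branch chain and min(key=len) call by one generator-filter feeding a stable sort by length whose head is returned (stability reproduces min's first-tie-wins); the dead all(...) branch is dropped and business_name.lower() is hoisted out of the per-element test.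
import Mathlib
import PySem

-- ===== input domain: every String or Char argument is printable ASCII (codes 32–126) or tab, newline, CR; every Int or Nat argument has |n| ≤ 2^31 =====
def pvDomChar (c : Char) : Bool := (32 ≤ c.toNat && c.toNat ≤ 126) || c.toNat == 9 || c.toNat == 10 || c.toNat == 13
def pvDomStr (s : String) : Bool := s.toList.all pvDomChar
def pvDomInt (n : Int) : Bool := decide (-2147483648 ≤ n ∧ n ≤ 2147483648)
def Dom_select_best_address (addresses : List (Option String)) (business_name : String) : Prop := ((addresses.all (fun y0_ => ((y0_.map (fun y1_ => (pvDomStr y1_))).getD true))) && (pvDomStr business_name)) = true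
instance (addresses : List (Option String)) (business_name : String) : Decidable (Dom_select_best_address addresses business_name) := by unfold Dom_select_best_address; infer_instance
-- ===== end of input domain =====

-- B replaces A's staged filters + branch chain + min(key=len) by a stable sort by length whose head is returned (objective: alternative).

-- ===== PORT A =====
def select_best_address (addresses : List (Option String)) (business_name : String) : Option String :=
  -- valid_addresses = [address.strip() for address in addresses if address]
  let valid1 : List String := addresses.filterMap (fun a =>
    a.bind (fun s => if s = "" then none else some (PySem.Str.strip s)))
  -- valid_addresses = [address for address in valid_addresses if business_name.lower() not in address.lower()]
  let valid2 : List String := valid1.filter (fun s =>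
    !(PySem.Str.isIn (PySem.Str.lower business_name) (PySem.Str.lower s)))
  if valid2.length = 1 then
    PySem.List.pyGet? valid2 0
  else if valid2.length = 0 then
    none
  else
    let shortest := PySem.List.min? valid2 (fun s => PySem.Str.len s)
    if addresses.all (fun a => a.isNone) then shortest else shortest

-- ===== PORT B =====
def select_best_address_alt (addresses : List (Option String)) (business_name : String) : Option String :=
  let needle := PySem.Str.lower business_name
  -- candidates = sorted((a.strip() for a in addresses if a and needle not in a.strip().lower()), key=len)
  let candidates := PySem.List.sorted
    (addresses.filterMap (fun a => a.bind (fun s =>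
      if s = "" then none
      else if PySem.Str.isIn needle (PySem.Str.lower (PySem.Str.strip s)) then none
      else some (PySem.Str.strip s))))
    (fun s => PySem.Str.len s)
  -- return candidates[0] if candidates else None
  if candidates.isEmpty then none else PySem.List.pyGet? candidates 0

-- ===== PRECONDITION & SPEC =====
def Spec_select_best_address (addresses : List (Option String)) (business_name : String) (out : Option String) : Prop := out = select_best_address_alt addresses business_name
instance (addresses : List (Option String)) (business_name : String) (out : Option String) : Decidable (Spec_select_best_address addresses business_name out) := by unfold Spec_select_best_address; infer_instance

-- ===== CLAIM =====
def Claim_equal_select_best_address : Prop := ∀ (addresses : List (Option String)) (business_name : String), Dom_select_best_address addresses business_name → Spec_select_best_address addresses business_name (select_best_address addresses business_name)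

-- ===== LEMMAS AND PROOFS =====

-- the per-item candidate extractor both programs effectively use
def pvExtract (business_name : String) (a : Option String) : Option String :=
  a.bind (fun s =>
    if s = "" then none
    else
      if PySem.Str.isIn (PySem.Str.lower business_name) (PySem.Str.lower (PySem.Str.strip s))
      then none
      else some (PySem.Str.strip s))

-- the candidate list both programs effectively range over
def pvCand (addresses : List (Option String)) (business_name : String) : List String :=
  addresses.filterMap (pvExtract business_name)

-- min()'s running-minimum step (strict <: the first minimal key wins)
def pvMinStep {α κ : Type} [LT κ] [DecidableLT κ] (key : α → κ)
    (best : Option α) (x : α) : Option α :=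
  match best with
  | none => some x
  | some m => if key x < key m then some x else some m

-- A's two-stage filtering equals the single filterMap by pvExtract
lemma valid2_eq_pvCand (addresses : List (Option String)) (business_name : String) :
    ((addresses.filterMap (fun a =>
        a.bind (fun s => if s = "" then none else some (PySem.Str.strip s)))).filter (fun s =>
          !(PySem.Str.isIn (PySem.Str.lower business_name) (PySem.Str.lower s))))
      = pvCand addresses business_name := by
  induction addresses with
  | nil => rfl
  | cons a t ih =>
    simp only [pvCand] at ih ⊢
    rw [List.filterMap_cons, List.filterMap_cons]
    cases a with
    | none => exact ih
    | some s =>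
      by_cases hs : s = ""
      · subst hs; exact ih
      · cases hin : PySem.Str.isIn (PySem.Str.lower business_name)
            (PySem.Str.lower (PySem.Str.strip s)) with
        | false =>
          have h1 : ((some s).bind (fun s => if s = "" then none
              else some (PySem.Str.strip s))) = some (PySem.Str.strip s) := by
            simp only [Option.bind_some, if_neg hs]
          have h2 : pvExtract business_name (some s) = some (PySem.Str.strip s) := by
            unfold pvExtract
            rw [Option.bind_some, if_neg hs, hin]
            simp
          rw [h1, h2]
          simp only [List.filter_cons, hin, Bool.not_false, if_pos]
          rw [ih]
        | true =>
          have h1 : ((some s).bind (fun s => if s = "" then none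
              else some (PySem.Str.strip s))) = some (PySem.Str.strip s) := by
            simp only [Option.bind_some, if_neg hs]
          have h2 : pvExtract business_name (some s) = none := by
            unfold pvExtract
            rw [Option.bind_some, if_neg hs, hin]
            simp
          rw [h1, h2]
          simp only [List.filter_cons, hin, Bool.not_true]
          simpa using ih

-- the head of an insertion is the running-minimum step applied to the old head
lemma head?_insertBy {α κ : Type} [LT κ] [DecidableLT κ] (key : α → κ)
    (x : α) (ys : List α) :
    (PySem.List.insertBy (fun a b => decide (key a < key b)) x ys).head?
      = pvMinStep key ys.head? x := by
  cases ys with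
  | nil => rfl
  | cons y t =>
    simp only [PySem.List.insertBy, pvMinStep]
    by_cases h : key x < key y <;> simp [h]

-- the head of the insertion-sort fold is min?'s running-minimum fold
lemma head?_foldl_insertBy {α κ : Type} [LT κ] [DecidableLT κ] (key : α → κ) :
    ∀ (xs : List α) (acc : List α),
      (xs.foldl (fun acc x =>
          PySem.List.insertBy (fun a b => decide (key a < key b)) x acc) acc).head?
        = xs.foldl (pvMinStep key) acc.head? := by
  intro xs
  induction xs with
  | nil => intro acc; rfl
  | cons x t ih =>
    intro acc
    simp only [List.foldl_cons]
    rw [ih, head?_insertBy]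

-- head of the stable sort = first minimal element = min?
lemma head?_sorted_eq_min? {α κ : Type} [LT κ] [DecidableLT κ]
    (xs : List α) (key : α → κ) :
    (PySem.List.sorted xs key false).head? = PySem.List.min? xs key := by
  unfold PySem.List.sorted PySem.List.min?
  simp only [if_neg (by decide : ¬ (false = true))]
  rw [head?_foldl_insertBy]
  rfl

-- B's sort-then-head computes min? over the candidate list
lemma alt_eq_min (addresses : List (Option String)) (business_name : String) :
    select_best_address_alt addresses business_name
      = PySem.List.min? (pvCand addresses business_name) (fun s => PySem.Str.len s) := by
  unfold select_best_address_alt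
  have hc : (addresses.filterMap (fun a => a.bind (fun s =>
      if s = "" then none
      else if PySem.Str.isIn (PySem.Str.lower business_name)
          (PySem.Str.lower (PySem.Str.strip s)) then none
      else some (PySem.Str.strip s)))) = pvCand addresses business_name := rfl
  simp only [hc]
  cases h : PySem.List.sorted (pvCand addresses business_name) (fun s => PySem.Str.len s) false with
  | nil =>
    rw [← head?_sorted_eq_min?, h]
    simp
  | cons m t =>
    rw [← head?_sorted_eq_min?, h]
    simp [PySem.List.pyGet?, PySem.List.pyIdx?]

-- A also computes that min? (its three branches all agree with it)
lemma a_eq_min (addresses : List (Option String)) (business_name : String) :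
    select_best_address addresses business_name
      = PySem.List.min? (pvCand addresses business_name) (fun s => PySem.Str.len s) := by
  unfold select_best_address
  simp only [valid2_eq_pvCand addresses business_name]
  rcases h : pvCand addresses business_name with _ | ⟨x, _ | ⟨y, t⟩⟩ <;>
    simp [PySem.List.min?, PySem.List.pyGet?, PySem.List.pyIdx?]

-- ===== VERDICT =====
theorem select_best_address_spec : Claim_equal_select_best_address := by
  intro addresses business_name _
  unfold Spec_select_best_address
  rw [a_eq_min, alt_eq_min]
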